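-- pv_equiv track=rewrite | github.com/fernandocostar/competitive-programming | uri/2601.py | solve
-- ===== SOURCE A (Python) =====
-- def calc(num):
-- 	result = 1
-- 	for i in range(1, num + 1):
-- 		result *= 2*i
-- 	return result
--
-- def solve(dado):
-- 	pares = 0
-- 	avulsos = 0
--
-- 	for i in range(0, len(dado)-1, 2):
-- 		if dado[i] == "*" and dado[i+1] == "*":
-- 			pares += 1
-- 		elif dado[i] == "*" and dado[i+1] != "*":
-- 			avulsos += 1
-- 		elif dado[i+1] == "*" and dado[i] != "*":
-- 			avulsos += 1
-- 	if pares == 0 and avulsos != 0: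
-- 		return 1
--
-- 	pares = calc(pares)
-- 	return pares
-- ===== SOURCE B (Python) =====
-- def _fact(n):
--     return 1 if n < 2 else n * _fact(n - 1)
--
-- def solve(dado):
--     it = iter(dado)
--     pairs = list(zip(it, it))  # consecutive two-character chunks
--     pares = sum(1 if a == '*' and b == '*' else 0 for a, b in pairs)
--     avulsos = sum(1 if (a == '*') != (b == '*') else 0 for a, b in pairs)
--     if pares == 0 and avulsos != 0:
--         return 1
--     return (1 << pares) * _fact(pares)
-- ===== Notes on version B (the rewrite author's own statement) =====
-- stated objective: alternative
-- what changed: The index loop over even positions becomes a zip-the-iterator-with-itself chunking pass with two comprehension sums, and the O(num) product of even numbers 2*1..2*num is replaced by the closed form (1 << num) * num! with a recursive factorial.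
import Mathlib
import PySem

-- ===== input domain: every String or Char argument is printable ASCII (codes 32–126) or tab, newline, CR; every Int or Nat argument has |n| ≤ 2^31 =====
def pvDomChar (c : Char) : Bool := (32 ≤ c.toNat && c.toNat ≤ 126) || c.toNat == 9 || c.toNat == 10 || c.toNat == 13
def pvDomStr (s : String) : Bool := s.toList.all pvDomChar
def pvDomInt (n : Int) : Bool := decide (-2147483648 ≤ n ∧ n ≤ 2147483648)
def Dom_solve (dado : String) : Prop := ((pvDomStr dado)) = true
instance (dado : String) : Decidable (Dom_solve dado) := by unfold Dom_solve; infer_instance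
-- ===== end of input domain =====

-- B replaces the even-index counting loop by a chunk-into-pairs pass with two comprehension
-- sums, and the product 2*1 * … * 2*num by the closed form (1 << num) * num!.

-- ===== PORT A =====
-- calc(num): result = 1; for i in range(1, num+1): result *= 2*i
def calcA (num : Int) : Int :=
  (PySem.List.pyRange 1 (num + 1) 1).foldl (fun result i => result * (2 * i)) 1

-- loop body of A: reads dado[i] and dado[i+1]; the `none` arm is unreachable because the
-- loop only produces indices i with i+1 ≤ len(dado)-1
def bodyA (cs : List Char) (st : Int × Int) (i : Int) : Int × Int :=
  match PySem.List.pyGet? cs i, PySem.List.pyGet? cs (i + 1) with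
  | some c0, some c1 =>
      if c0 = '*' ∧ c1 = '*' then (st.1 + 1, st.2)
      else if c0 = '*' ∧ c1 ≠ '*' then (st.1, st.2 + 1)
      else if c1 = '*' ∧ c0 ≠ '*' then (st.1, st.2 + 1)
      else st
  | _, _ => st

def solve (dado : String) : Int :=
  let st := (PySem.List.pyRange 0 ((dado.toList.length : Int) - 1) 2).foldl
    (bodyA dado.toList) (0, 0)
  if st.1 = 0 ∧ st.2 ≠ 0 then 1 else calcA st.1

-- ===== PORT B =====
-- port of `zip(it, it)` on the same iterator: consecutive disjoint pairs, a trailing odd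
-- element is dropped (exact: zip stops when the iterator is exhausted)
def pairsOf : List Char → List (Char × Char)
  | a :: b :: r => (a, b) :: pairsOf r
  | _ => []

-- _fact(n) = 1 if n < 2 else n * _fact(n-1)
def factB (n : Int) : Int :=
  if n < 2 then 1 else n * factB (n - 1)
termination_by n.toNat
decreasing_by omega

def solve_alt (dado : String) : Int :=
  let pairs := pairsOf dado.toList
  let pares := (pairs.map (fun p => if p.1 = '*' ∧ p.2 = '*' then (1 : Int) else 0)).sum
  let avulsos := (pairs.map (fun p => if (p.1 == '*') != (p.2 == '*') then (1 : Int) else 0)).sum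
  if pares = 0 ∧ avulsos ≠ 0 then 1
  else ((1 : Int) <<< pares.toNat) * factB pares  -- pares ≥ 0, so `.toNat` is Python's `1 << pares`

-- ===== PRECONDITION & SPEC =====
def Spec_solve (dado : String) (out : Int) : Prop := out = solve_alt dado
instance (dado : String) (out : Int) : Decidable (Spec_solve dado out) := by unfold Spec_solve; infer_instance

-- ===== CLAIM (what is proved, stated in full; the proofs are below) =====
def Claim_equal_solve : Prop := ∀ (dado : String), Dom_solve dado → Spec_solve dado (solve dado)

-- ===== LEMMAS AND PROOFS =====

-- abbreviations for B's two comprehension sums (definitionally what solve_alt computes)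
def paresOf (ps : List (Char × Char)) : Int :=
  (ps.map (fun p => if p.1 = '*' ∧ p.2 = '*' then (1 : Int) else 0)).sum

def avulsosOf (ps : List (Char × Char)) : Int :=
  (ps.map (fun p => if (p.1 == '*') != (p.2 == '*') then (1 : Int) else 0)).sum

-- A's loop indices 0, 2, …: range(0, n-1, 2) has exactly n/2 entries 2*k
lemma rangeA (n : Nat) :
    PySem.List.pyRange 0 ((n : Int) - 1) 2
      = (List.range (n / 2)).map (fun k : Nat => (2 : Int) * (k : Int)) := by
  rw [PySem.List.pyRange_of_pos _ _ (by norm_num)]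
  have hc : (if (0:Int) < (n : Int) - 1 then (((n : Int) - 1 - 0 + 2 - 1) / 2).toNat else 0) = n / 2 := by
    split_ifs with h <;> omega
  rw [hc]
  simp only [zero_add]

-- dropping the two leading characters shifts A's loop body by one pair
lemma bodyA_shift (a b : Char) (r : List Char) (st : Int × Int) (k : Nat) :
    bodyA (a :: b :: r) st (2 * (k : Int) + 2) = bodyA r st (2 * (k : Int)) := by
  have e1 : PySem.List.pyGet? (a :: b :: r) (2 * (k : Int) + 2) = PySem.List.pyGet? r (2 * (k : Int)) := by
    have h1 : (2 * (k : Int) + 2) = ((2 * k + 2 : Nat) : Int) := by push_cast; ring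
    have h2 : (2 * (k : Int)) = ((2 * k : Nat) : Int) := by push_cast; ring
    rw [h1, h2, PySem.List.pyGet?_natCast, PySem.List.pyGet?_natCast,
      show 2 * k + 2 = (2 * k + 1) + 1 from rfl, List.getElem?_cons_succ, List.getElem?_cons_succ]
  have e2 : PySem.List.pyGet? (a :: b :: r) ((2 * (k : Int) + 2) + 1) = PySem.List.pyGet? r (2 * (k : Int) + 1) := by
    have h1 : ((2 * (k : Int) + 2) + 1) = ((2 * k + 3 : Nat) : Int) := by push_cast; ring
    have h2 : (2 * (k : Int) + 1) = ((2 * k + 1 : Nat) : Int) := by push_cast; ring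
    rw [h1, h2, PySem.List.pyGet?_natCast, PySem.List.pyGet?_natCast,
      show 2 * k + 3 = (2 * k + 2) + 1 from rfl, show 2*k+2 = (2*k+1)+1 from rfl,
      List.getElem?_cons_succ, List.getElem?_cons_succ]
  unfold bodyA
  rw [e1, e2]

-- A's branch cascade on the first pair equals B's two 0/1 indicators
lemma bodyA_zero (a b : Char) (r : List Char) (st : Int × Int) :
    bodyA (a :: b :: r) st 0
      = (st.1 + (if a = '*' ∧ b = '*' then 1 else 0),
         st.2 + (if (a == '*') != (b == '*') then 1 else 0)) := by
  have e1 : PySem.List.pyGet? (a :: b :: r) 0 = some a := by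
    rw [show (0:Int) = ((0:Nat):Int) from rfl, PySem.List.pyGet?_natCast]; rfl
  have e2 : PySem.List.pyGet? (a :: b :: r) (0+1) = some b := by
    rw [show (0:Int)+1 = ((1:Nat):Int) from rfl, PySem.List.pyGet?_natCast]; rfl
  unfold bodyA
  rw [e1, e2]
  by_cases ha : a = '*' <;> by_cases hb : b = '*' <;> simp [ha, hb]

-- the loop invariant: A's fold accumulates exactly B's two sums
lemma loopA (cs : List Char) (st : Int × Int) :
    (List.range (cs.length / 2)).foldl (fun (st : Int × Int) (k : Nat) => bodyA cs st (2 * (k : Int))) st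
      = (st.1 + paresOf (pairsOf cs), st.2 + avulsosOf (pairsOf cs)) := by
  induction cs using pairsOf.induct generalizing st with
  | case1 a b r ih =>
    have hl : (a :: b :: r).length / 2 = r.length / 2 + 1 := by simp; omega
    rw [hl, List.range_succ_eq_map, List.foldl_cons, List.foldl_map]
    have hstep : (fun (st : Int × Int) (k : Nat) => bodyA (a :: b :: r) st (2 * ((k.succ : Nat) : Int)))
        = fun (st : Int × Int) (k : Nat) => bodyA r st (2 * (k : Int)) := by
      funext st k
      have : (2 * ((k.succ : Nat) : Int)) = 2 * (k : Int) + 2 := by push_cast; ring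
      rw [this, bodyA_shift]
    rw [hstep]
    rw [ih]
    rw [show (2 * ((0:Nat) : Int)) = 0 by norm_num, bodyA_zero]
    simp [pairsOf, paresOf, avulsosOf]
    constructor <;> ring
  | case2 cs h1 =>
    rcases cs with _ | ⟨a, _ | ⟨b, r⟩⟩
    · simp [pairsOf, paresOf, avulsosOf]
    · simp [pairsOf, paresOf, avulsosOf]
    · exact absurd rfl (h1 a b r)

lemma paresOf_nonneg (ps : List (Char × Char)) : 0 ≤ paresOf ps := by
  induction ps with
  | nil => simp [paresOf]
  | cons p t ih =>
    simp only [paresOf, List.map_cons, List.sum_cons] at *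
    split_ifs <;> omega

lemma factB_succ (j : Nat) : factB ((j : Int) + 1) = ((j : Int) + 1) * factB (j : Int) := by
  cases j with
  | zero =>
    have h0 : factB 0 = 1 := by rw [factB]; norm_num
    have h1 : factB 1 = 1 := by rw [factB]; norm_num
    push_cast
    rw [h1, h0]
    norm_num
  | succ m =>
    rw [factB]
    rw [if_neg (by push_cast; omega)]
    norm_num

-- calc(k) = 2^k * k!
lemma calc_closed (k : Nat) : calcA (k : Int) = ((1 : Int) <<< k) * factB (k : Int) := by
  induction k with
  | zero =>
    have h0 : factB 0 = 1 := by rw [factB]; norm_num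
    push_cast
    norm_num [calcA, PySem.List.pyRange, Int.shiftLeft_eq, h0]
  | succ j ih =>
    have hr : PySem.List.pyRange 1 ((j : Int) + 1 + 1) 1 = PySem.List.pyRange 1 ((j : Int) + 1) 1 ++ [(j : Int) + 1] :=
      PySem.List.pyRange_one_succ_right (by omega)
    unfold calcA
    push_cast
    rw [hr, List.foldl_append]
    have : (PySem.List.pyRange 1 ((j : Int) + 1) 1).foldl (fun result i => result * (2 * i)) 1 = calcA (j : Int) := by
      unfold calcA; norm_num
    rw [this, ih, List.foldl_cons, List.foldl_nil, factB_succ]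
    rw [Int.shiftLeft_eq, Int.shiftLeft_eq]
    ring

-- ===== VERDICT (by name: the statement is the Claim_ definition above) =====
theorem solve_spec : Claim_equal_solve := by
  intro dado _
  unfold Spec_solve solve solve_alt
  rw [rangeA dado.toList.length, List.foldl_map, loopA]
  simp only [zero_add]
  show (if paresOf (pairsOf dado.toList) = 0 ∧ avulsosOf (pairsOf dado.toList) ≠ 0 then 1
        else calcA (paresOf (pairsOf dado.toList)))
      = (if paresOf (pairsOf dado.toList) = 0 ∧ avulsosOf (pairsOf dado.toList) ≠ 0 then 1
        else ((1 : Int) <<< (paresOf (pairsOf dado.toList)).toNat) * factB (paresOf (pairsOf dado.toList)))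
  split_ifs with h
  · rfl
  · have hm : paresOf (pairsOf dado.toList) = ((paresOf (pairsOf dado.toList)).toNat : Int) :=
      (Int.toNat_of_nonneg (paresOf_nonneg _)).symm
    rw [hm, calc_closed, Int.toNat_natCast]
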